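-- pv_equiv track=rewrite | github.com/HyoilKim/Ps | BaekJoon/자료구조/2504(괄호의 값).py | solution
-- ===== SOURCE A (Python) =====
-- def solution(s):
--     stack = []
--     ans = 0
--     tmp = 1
--     for i in range(len(s)):
--         ch = s[i]
--         if ch == '(':
--             stack.append(ch)
--             tmp *= 2
--         elif ch =='[':
--             stack.append(ch)
--             tmp *= 3
--         elif ch == ')' and stack:
--             if s[i-1] == '(': ans += tmp
--             if stack[-1] == '(': stack.pop()
--             else: return 0
--             tmp //= 2
--         elif ch == ']' and stack:
--             if s[i-1] == '[': ans += tmp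
--             if stack[-1] == '[': stack.pop()
--             else: return 0
--             tmp //= 3
--         else:
--             return 0
--
--     return ans if len(stack) == 0 else 0
-- ===== SOURCE B (Python) =====
-- def solution(s):
--     # Stack of completed integer values and open-bracket markers instead of A's scalar multiplier.
--     stack = []
--     for ch in s:
--         if ch == '(' or ch == '[':
--             stack.append(ch)
--         elif ch == ')' or ch == ']':
--             total = 0
--             while stack and isinstance(stack[-1], int):
--                 total += stack.pop()
--             want = '(' if ch == ')' else '['
--             if not stack or stack[-1] != want:
--                 return 0
--             stack.pop()
--             stack.append(max(total, 1) * (2 if ch == ')' else 3))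
--         else:
--             return 0
--     result = 0
--     for e in stack:
--         if isinstance(e, int):
--             result += e
--         else:
--             return 0
--     return result
-- ===== Notes on version B (the rewrite author's own statement) =====
-- stated objective: alternative
-- what changed: A keeps a char stack plus a running depth multiplier (tmp) and peeks at the previous character to credit empty pairs into a global accumulator; B instead pushes completed integer values onto the stack, folding the run of values into a local total on each closing bracket and pushing max(total,1)*2 or *3, then sums the surviving values at the end.
import Mathlib
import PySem

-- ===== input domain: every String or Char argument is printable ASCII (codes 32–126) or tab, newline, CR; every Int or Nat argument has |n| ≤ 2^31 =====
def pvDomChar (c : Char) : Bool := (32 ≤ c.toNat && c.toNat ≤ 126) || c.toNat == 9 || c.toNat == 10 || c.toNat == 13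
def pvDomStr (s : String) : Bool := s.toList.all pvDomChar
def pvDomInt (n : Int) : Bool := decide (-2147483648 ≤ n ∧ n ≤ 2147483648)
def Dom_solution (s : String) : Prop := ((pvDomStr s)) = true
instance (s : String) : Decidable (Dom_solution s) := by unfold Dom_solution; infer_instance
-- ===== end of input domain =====

-- B replaces A's running scalar multiplier/accumulator with a stack of completed numeric values
-- (alternative algorithm, same cost); return values proved equal on all inputs.

-- ===== PORT A =====
-- A reads s[i-1] only in branches guarded by a nonempty stack, which forces i ≥ 1;
-- the port carries the previous character as `prev` (none before the first step), which is
-- exactly s[i-1] whenever those branches are reachable.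
def solutionA_loop : List Char → List Char → Int → Int → Option Char → Int
  | [], stack, ans, _tmp, _prev => if stack = [] then ans else 0
  | c :: rest, stack, ans, tmp, prev =>
    if c = '(' then solutionA_loop rest (c :: stack) ans (tmp * 2) (some c)
    else if c = '[' then solutionA_loop rest (c :: stack) ans (tmp * 3) (some c)
    else if c = ')' ∧ stack ≠ [] then
      let ans' := if prev = some '(' then ans + tmp else ans
      match stack with
      | top :: st => if top = '(' then solutionA_loop rest st ans' (PySem.Int.floordiv tmp 2) (some c) else 0
      | [] => 0
    else if c = ']' ∧ stack ≠ [] then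
      let ans' := if prev = some '[' then ans + tmp else ans
      match stack with
      | top :: st => if top = '[' then solutionA_loop rest st ans' (PySem.Int.floordiv tmp 3) (some c) else 0
      | [] => 0
    else 0

def solution (s : String) : Int := solutionA_loop s.toList [] 0 1 none

-- ===== PORT B =====
-- B's stack holds open-bracket markers and completed integer values (list head = stack top).
inductive PEntry
  | opn : Char → PEntry
  | val : Int → PEntry
deriving DecidableEq, Repr

-- the `while stack and isinstance(stack[-1], int): total += stack.pop()` loop
def popRun : List PEntry → Int × List PEntry
  | PEntry.val v :: rest => let p := popRun rest; (v + p.1, p.2)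
  | st => (0, st)

-- closing bracket: pop the run of values, demand the matching open marker, push the new value
def closeB (want : Char) (m : Int) (st : List PEntry) : Option (List PEntry) :=
  let p := popRun st
  match p.2 with
  | PEntry.opn c :: r => if c = want then some (PEntry.val (max p.1 1 * m) :: r) else none
  | _ => none

-- final walk: sum the values, none if an open marker remains (Python walks bottom-up;
-- the result — 0 on any marker, else the sum — does not depend on the direction)
def sumB : List PEntry → Option Int
  | [] => some 0
  | PEntry.opn _ :: _ => none
  | PEntry.val v :: r => match sumB r with
    | some t => some (v + t)
    | none => none

def solutionB_loop : List Char → List PEntry → Int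
  | [], st => (sumB st).getD 0
  | c :: rest, st =>
    if c = '(' ∨ c = '[' then solutionB_loop rest (PEntry.opn c :: st)
    else if c = ')' then
      match closeB '(' 2 st with
      | some st' => solutionB_loop rest st'
      | none => 0
    else if c = ']' then
      match closeB '[' 3 st with
      | some st' => solutionB_loop rest st'
      | none => 0
    else 0

def solution_alt (s : String) : Int := solutionB_loop s.toList []

-- ===== PRECONDITION & SPEC =====
def Spec_solution (s : String) (out : Int) : Prop := out = solution_alt s
instance (s : String) (out : Int) : Decidable (Spec_solution s out) := by unfold Spec_solution; infer_instance

-- ===== CLAIM (what is proved, stated in full; the proofs are below) =====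
def Claim_equal_solution : Prop := ∀ (s : String), Dom_solution s → Spec_solution s (solution s)

-- ===== LEMMAS AND PROOFS =====

theorem fd_exact (m q : Int) (hm : 0 < m) : PySem.Int.floordiv (m * q) m = q := by
  rw [PySem.Int.floordiv_eq_ediv_of_pos hm]
  exact Int.mul_ediv_cancel_left _ (by omega)

-- product of the multipliers of the open markers in a B-stack (A's tmp)
def pOf : List PEntry → Int
  | [] => 1
  | PEntry.opn c :: r => (if c = '(' then 2 else 3) * pOf r
  | PEntry.val _ :: r => pOf r

-- each value weighted by the multipliers of the markers below it (A's ans)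
def sOf : List PEntry → Int
  | [] => 0
  | PEntry.opn _ :: r => sOf r
  | PEntry.val v :: r => v * pOf r + sOf r

-- the open markers of a B-stack (A's stack)
def opensOf : List PEntry → List Char
  | [] => []
  | PEntry.opn c :: r => c :: opensOf r
  | PEntry.val _ :: r => opensOf r

def valsPos (st : List PEntry) : Prop := ∀ v : Int, PEntry.val v ∈ st → 1 ≤ v

-- relation between A's previous character and the top of B's stack
def headRel : Option Char → List PEntry → Prop
  | none, st => st = []
  | some c, st =>
      ((c = '(' ∨ c = '[') ∧ ∃ r, st = PEntry.opn c :: r) ∨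
      ((c = ')' ∨ c = ']') ∧ ∃ v r, st = PEntry.val v :: r)

theorem popRun_spec : ∀ st : List PEntry, valsPos st →
    opensOf (popRun st).2 = opensOf st ∧
    pOf (popRun st).2 = pOf st ∧
    sOf st = (popRun st).1 * pOf st + sOf (popRun st).2 ∧
    valsPos (popRun st).2 ∧
    0 ≤ (popRun st).1 ∧
    (∀ v r, st = PEntry.val v :: r → 1 ≤ (popRun st).1) ∧
    (∀ v r, (popRun st).2 ≠ PEntry.val v :: r) := by
  intro st
  induction st with
  | nil => intro _; simp [popRun, opensOf, pOf, sOf, valsPos]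
  | cons e r ih =>
    intro hpos
    cases e with
    | opn c =>
      refine ⟨by simp [popRun], by simp [popRun], by simp [popRun, sOf], ?_, ?_, ?_, ?_⟩
      · simpa only [popRun] using hpos
      · simp [popRun]
      · intro v r' h; cases h
      · intro v r'; simp [popRun]
    | val v =>
      have hv : 1 ≤ v := hpos v (List.mem_cons_self ..)
      have hr : valsPos r := fun w hw => hpos w (List.mem_cons_of_mem _ hw)
      obtain ⟨h1, h2, h3, h4, h5, _h6, h7⟩ := ih hr
      refine ⟨by simpa [popRun, opensOf] using h1,
              by simpa [popRun, pOf] using h2, ?_, by simpa [popRun] using h4,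
              by simp only [popRun]; omega, ?_, by simpa [popRun] using h7⟩
      · simp only [popRun, sOf, pOf]
        rw [h3]; ring
      · intro w r' _; simp only [popRun]; omega

theorem sumB_of_no_open : ∀ st : List PEntry, opensOf st = [] → sumB st = some (sOf st) := by
  intro st
  induction st with
  | nil => intro _; simp [sumB, sOf]
  | cons e r ih =>
    intro h
    cases e with
    | opn c => simp [opensOf] at h
    | val v =>
      have := ih (by simpa [opensOf] using h)
      have hp : pOf r = 1 := by
        clear ih this
        induction r with
        | nil => simp [pOf]
        | cons e' r' ih' =>
          cases e' with
          | opn c' => simp [opensOf] at h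
          | val w =>
            simp only [pOf]
            exact ih' (by simpa [opensOf] using h)
      simp [sumB, sOf, this, hp]

theorem sumB_of_open : ∀ st : List PEntry, opensOf st ≠ [] → sumB st = none := by
  intro st
  induction st with
  | nil => intro h; simp [opensOf] at h
  | cons e r ih =>
    intro h
    cases e with
    | opn c => simp [sumB]
    | val v =>
      have := ih (by simpa [opensOf] using h)
      simp [sumB, this]

theorem loop_eq : ∀ (cs : List Char) (prev : Option Char) (bst : List PEntry),
    valsPos bst → headRel prev bst →
    solutionA_loop cs (opensOf bst) (sOf bst) (pOf bst) prev = solutionB_loop cs bst := by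
  intro cs
  induction cs with
  | nil =>
    intro prev bst hpos _hrel
    simp only [solutionA_loop, solutionB_loop]
    by_cases h : opensOf bst = []
    · rw [sumB_of_no_open bst h]; simp [h]
    · rw [sumB_of_open bst h]; simp [h]
  | cons c rest ih =>
    intro prev bst hpos hrel
    by_cases hc1 : c = '('
    · subst hc1
      have h := ih (some '(') (PEntry.opn '(' :: bst)
        (fun v hv => hpos v (by simpa using hv))
        (Or.inl ⟨Or.inl rfl, bst, rfl⟩)
      simp only [solutionA_loop, solutionB_loop, if_pos]
      simpa [opensOf, sOf, pOf, mul_comm] using h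
    · by_cases hc2 : c = '['
      · subst hc2
        have h := ih (some '[') (PEntry.opn '[' :: bst)
          (fun v hv => hpos v (by simpa using hv))
          (Or.inl ⟨Or.inr rfl, bst, rfl⟩)
        simp only [solutionA_loop, solutionB_loop, reduceIte]
        simpa [opensOf, sOf, pOf, mul_comm] using h
      · by_cases hc3 : c = ')'
        · subst hc3
          cases prev with
          | none =>
            simp only [headRel] at hrel; subst hrel
            simp [solutionA_loop, solutionB_loop, closeB, popRun, opensOf]
          | some p =>
            rcases hrel with ⟨hp, r, hbst⟩ | ⟨hp, v, r, hbst⟩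
            · subst hbst
              by_cases hp2 : p = '('
              · subst hp2
                have h := ih (some ')') (PEntry.val 2 :: r)
                  (by intro w hw
                      rcases List.mem_cons.1 hw with h' | h'
                      · cases h'; omega
                      · exact hpos w (List.mem_cons_of_mem _ h'))
                  (Or.inr ⟨Or.inl rfl, 2, r, rfl⟩)
                have hfd := fd_exact 2 (pOf r) (by norm_num)
                simpa [solutionA_loop, solutionB_loop, closeB, popRun, opensOf,
                  sOf, pOf, hfd, add_comm, mul_comm] using h
              · simp [solutionA_loop, solutionB_loop, closeB, popRun, opensOf, hp2]
            · subst hbst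
              have hpne : p ≠ '(' := by rcases hp with h' | h' <;> simp [h']
              obtain ⟨h1, h2, h3, h4, h5, h6, h7⟩ :=
                popRun_spec (PEntry.val v :: r) hpos
              have ht := h6 v r rfl
              rcases hpr : popRun (PEntry.val v :: r) with ⟨t, st'⟩
              rw [hpr] at h1 h2 h3 h4 ht h7
              rcases hst' : st' with _ | ⟨e, r2⟩
              · subst hst'
                have ho : opensOf (PEntry.val v :: r) = [] := h1.symm
                simp [solutionA_loop, solutionB_loop, closeB, ho, hpr]
              · subst hst'
                cases e with
                | val w => exact absurd rfl (h7 w r2)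
                | opn c' =>
                  have ho : opensOf (PEntry.val v :: r) = c' :: opensOf r2 := by
                    rw [← h1]; rfl
                  by_cases hcp : c' = '('
                  · subst hcp
                    have hmax : max t 1 = t := by omega
                    have h := ih (some ')') (PEntry.val (t * 2) :: r2)
                      (by intro w hw
                          rcases List.mem_cons.1 hw with h' | h'
                          · cases h'; omega
                          · exact h4 w (List.mem_cons_of_mem _ h'))
                      (Or.inr ⟨Or.inl rfl, t * 2, r2, rfl⟩)
                    have hpof : pOf (PEntry.val v :: r) = 2 * pOf r2 := by
                      rw [← h2]; simp [pOf]
                    have hsof : sOf (PEntry.val v :: r) = t * 2 * pOf r2 + sOf r2 := by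
                      rw [h3, hpof]; simp only [sOf]; ring
                    have hfd := fd_exact 2 (pOf r2) (by norm_num)
                    rw [ho, hpof, hsof]
                    simpa [solutionA_loop, solutionB_loop, closeB, hpr, hmax,
                      hfd, hpne, sOf, pOf, opensOf, add_comm, mul_comm] using h
                  · simp [solutionA_loop, solutionB_loop, closeB, hpr, ho, hcp]
        · by_cases hc4 : c = ']'
          · subst hc4
            cases prev with
            | none =>
              simp only [headRel] at hrel; subst hrel
              simp [solutionA_loop, solutionB_loop, closeB, popRun, opensOf]
            | some p =>
              rcases hrel with ⟨hp, r, hbst⟩ | ⟨hp, v, r, hbst⟩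
              · subst hbst
                by_cases hp2 : p = '['
                · subst hp2
                  have h := ih (some ']') (PEntry.val 3 :: r)
                    (by intro w hw
                        rcases List.mem_cons.1 hw with h' | h'
                        · cases h'; omega
                        · exact hpos w (List.mem_cons_of_mem _ h'))
                    (Or.inr ⟨Or.inr rfl, 3, r, rfl⟩)
                  have hfd := fd_exact 3 (pOf r) (by norm_num)
                  simpa [solutionA_loop, solutionB_loop, closeB, popRun, opensOf,
                    sOf, pOf, hfd, add_comm, mul_comm] using h
                · simp [solutionA_loop, solutionB_loop, closeB, popRun, opensOf, hp2]
              · subst hbst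
                have hpne : p ≠ '[' := by rcases hp with h' | h' <;> simp [h']
                obtain ⟨h1, h2, h3, h4, h5, h6, h7⟩ :=
                  popRun_spec (PEntry.val v :: r) hpos
                have ht := h6 v r rfl
                rcases hpr : popRun (PEntry.val v :: r) with ⟨t, st'⟩
                rw [hpr] at h1 h2 h3 h4 ht h7
                rcases hst' : st' with _ | ⟨e, r2⟩
                · subst hst'
                  have ho : opensOf (PEntry.val v :: r) = [] := h1.symm
                  simp [solutionA_loop, solutionB_loop, closeB, ho, hpr]
                · subst hst'
                  cases e with
                  | val w => exact absurd rfl (h7 w r2)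
                  | opn c' =>
                    have ho : opensOf (PEntry.val v :: r) = c' :: opensOf r2 := by
                      rw [← h1]; rfl
                    by_cases hcp : c' = '['
                    · subst hcp
                      have hmax : max t 1 = t := by omega
                      have h := ih (some ']') (PEntry.val (t * 3) :: r2)
                        (by intro w hw
                            rcases List.mem_cons.1 hw with h' | h'
                            · cases h'; omega
                            · exact h4 w (List.mem_cons_of_mem _ h'))
                        (Or.inr ⟨Or.inr rfl, t * 3, r2, rfl⟩)
                      have hpof : pOf (PEntry.val v :: r) = 3 * pOf r2 := by
                        rw [← h2]; simp [pOf]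
                      have hsof : sOf (PEntry.val v :: r) = t * 3 * pOf r2 + sOf r2 := by
                        rw [h3, hpof]; simp only [sOf]; ring
                      have hfd := fd_exact 3 (pOf r2) (by norm_num)
                      rw [ho, hpof, hsof]
                      simpa [solutionA_loop, solutionB_loop, closeB, hpr, hmax,
                        hfd, hpne, sOf, pOf, opensOf, add_comm, mul_comm] using h
                    · simp [solutionA_loop, solutionB_loop, closeB, hpr, ho, hcp]
          · -- c is none of the four bracket characters: both return 0
            simp [solutionA_loop, solutionB_loop, hc1, hc2, hc3, hc4]

-- ===== VERDICT (by name: the statement is the Claim_ definition above) =====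
theorem solution_spec : Claim_equal_solution := by
  intro s _hdom
  unfold Spec_solution solution solution_alt
  have := loop_eq s.toList none [] (by intro v h; cases h) (by simp [headRel])
  simpa [opensOf, sOf, pOf] using this
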